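-- pv_equiv track=rewrite | github.com/lisalu1208/NZPC | NZPC/2017/problemE.py | CheckBit
-- ===== SOURCE A (Python) =====
-- def CheckBit(bList, totalcountOne):
--     lineBit = 0
--     for i in range(len(bList[0])):
--         countBit = 0
--         for byte in bList:
--             if byte[i] == "1":
--                 countBit += 1
--         if countBit % 2 != totalcountOne % 2:
--             lineBit = i + 1
--     return lineBit
-- ===== SOURCE B (Python) =====
-- def CheckBit(bList, totalcountOne):
--     width = len(bList[0])
--     counts = [0] * width
--     for byte in bList:
--         counts = [counts[i] + (1 if byte[i] == "1" else 0) for i in range(width)]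
--     lineBit = 0
--     for i, c in enumerate(counts):
--         if c % 2 != totalcountOne % 2:
--             lineBit = i + 1
--     return lineBit
-- ===== Notes on version B (the rewrite author's own statement) =====
-- stated objective: alternative
-- what changed: Column-outer nested scans (one full pass over bList per column) are replaced by a single row-pass that accumulates a per-column count table, followed by a separate enumerate scan of that table for the parity test.
import Mathlib
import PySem

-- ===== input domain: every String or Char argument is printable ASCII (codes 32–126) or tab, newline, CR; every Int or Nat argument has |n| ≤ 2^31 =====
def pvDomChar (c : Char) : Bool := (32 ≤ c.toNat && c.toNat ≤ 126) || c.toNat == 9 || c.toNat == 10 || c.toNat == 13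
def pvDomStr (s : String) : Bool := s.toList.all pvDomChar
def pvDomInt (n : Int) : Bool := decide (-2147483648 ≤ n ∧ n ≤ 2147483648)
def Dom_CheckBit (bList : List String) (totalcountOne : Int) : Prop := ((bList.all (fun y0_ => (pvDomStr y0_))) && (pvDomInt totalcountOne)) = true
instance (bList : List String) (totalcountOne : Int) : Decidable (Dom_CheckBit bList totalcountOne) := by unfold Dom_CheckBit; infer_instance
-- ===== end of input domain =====

-- B replaces A's column-outer nested scans by one row-pass building a per-column count
-- table plus a separate enumerate scan of that table (alternative decomposition, same cost).

-- ===== PORT A =====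
-- bList[0] raises IndexError on []; Pre_ excludes that, so headD "" is unreachable default
def CheckBit (bList : List String) (totalcountOne : Int) : Int :=
  (PySem.List.pyRange 0 ((bList.headD "").toList.length : Int) 1).foldl
    (fun lineBit i =>
      let countBit : Int :=
        bList.foldl (fun c byte => if PySem.Str.pyGet? byte i = some '1' then c + 1 else c) 0
      if PySem.Int.mod countBit 2 ≠ PySem.Int.mod totalcountOne 2 then i + 1 else lineBit)
    0

-- ===== PORT B =====
def CheckBit_alt (bList : List String) (totalcountOne : Int) : Int :=
  let width : Int := ((bList.headD "").toList.length : Int)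
  let counts : List Int := bList.foldl
    (fun counts byte =>
      (PySem.List.pyRange 0 width 1).map
        (fun i => PySem.List.pyGetD counts i 0 +
                  (if PySem.Str.pyGet? byte i = some '1' then (1 : Int) else 0)))
    (PySem.List.pyRepeat [(0 : Int)] width)
  (PySem.List.enumerate counts 0).foldl
    (fun lineBit p =>
      if PySem.Int.mod p.2 2 ≠ PySem.Int.mod totalcountOne 2 then p.1 + 1 else lineBit)
    0

-- ===== PRECONDITION & SPEC =====
-- Pre_ excludes exactly the inputs where Python's A raises IndexError: an empty bList
-- (bList[0]) or a row shorter than the first row (byte[i]).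
def Pre_CheckBit (bList : List String) (totalcountOne : Int) : Prop :=
  bList ≠ [] ∧ ∀ s ∈ bList, (bList.headD "").toList.length ≤ s.toList.length
instance (bList : List String) (totalcountOne : Int) : Decidable (Pre_CheckBit bList totalcountOne) := by unfold Pre_CheckBit; infer_instance
def pvWitness_CheckBit : List String × Int := (["101", "110"], 1)

def Spec_CheckBit (bList : List String) (totalcountOne : Int) (out : Int) : Prop := out = CheckBit_alt bList totalcountOne
instance (bList : List String) (totalcountOne : Int) (out : Int) : Decidable (Spec_CheckBit bList totalcountOne out) := by unfold Spec_CheckBit; infer_instance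

-- ===== CLAIM (what is proved, stated in full; the proofs are below) =====
def Claim_equal_CheckBit : Prop := ∀ (bList : List String) (totalcountOne : Int), Dom_CheckBit bList totalcountOne → Pre_CheckBit bList totalcountOne → Spec_CheckBit bList totalcountOne (CheckBit bList totalcountOne)

-- ===== LEMMAS AND PROOFS =====

-- the 0/1 contribution of one row to column i
def pvInd (byte : String) (i : Int) : Int :=
  if PySem.Str.pyGet? byte i = some '1' then 1 else 0

-- the total count of column i, as a sum
def pvCol (bList : List String) (i : Int) : Int :=
  (bList.map (fun b => pvInd b i)).sum

theorem pvCountBit_eq (bList : List String) (i : Int) :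
    bList.foldl (fun c byte => if PySem.Str.pyGet? byte i = some '1' then c + 1 else c) 0
      = pvCol bList i := by
  have h : (fun (c : Int) (byte : String) =>
      if PySem.Str.pyGet? byte i = some '1' then c + 1 else c)
      = (fun c byte => c + pvInd byte i) := by
    funext c b; unfold pvInd; split <;> simp
  rw [h, PySem.List.foldl_add]; simp [pvCol]

-- invariant of B's row pass: the table is the per-column sums of the processed rows
theorem pvBuild (w : Int) (bs : List String) (f : Int → Int) :
    bs.foldl
      (fun counts byte =>
        (PySem.List.pyRange 0 w 1).map
          (fun i => PySem.List.pyGetD counts i 0 +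
                    (if PySem.Str.pyGet? byte i = some '1' then (1 : Int) else 0)))
      ((PySem.List.pyRange 0 w 1).map f)
      = (PySem.List.pyRange 0 w 1).map (fun i => f i + pvCol bs i) := by
  induction bs generalizing f with
  | nil => simp [pvCol]
  | cons b bs ih =>
    rw [List.foldl_cons]
    have hstep :
        (PySem.List.pyRange 0 w 1).map
          (fun i => PySem.List.pyGetD ((PySem.List.pyRange 0 w 1).map f) i 0 +
                    (if PySem.Str.pyGet? b i = some '1' then (1 : Int) else 0))
        = (PySem.List.pyRange 0 w 1).map (fun i => f i + pvInd b i) := by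
      apply List.map_congr_left
      intro i hi
      rcases (PySem.List.mem_pyRange_one).1 hi with ⟨h0, hw⟩
      rw [PySem.List.pyGetD_map_pyRange_of_nonneg f w i 0 h0 hw]
      rfl
    rw [hstep, ih]
    apply List.map_congr_left
    intro i _
    simp [pvCol, pvInd]
    ring

theorem pvInit (w : Int) :
    PySem.List.pyRepeat [(0 : Int)] w
      = (PySem.List.pyRange 0 w 1).map (fun _ => (0 : Int)) := by
  rw [PySem.List.pyRepeat_singleton, List.map_const', PySem.List.length_pyRange_one]
  simp

-- ===== VERDICT (by name: the statement is the Claim_ definition above) =====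
theorem CheckBit_spec : Claim_equal_CheckBit := by
  intro bList totalcountOne _ _
  show CheckBit bList totalcountOne = CheckBit_alt bList totalcountOne
  simp only [CheckBit, CheckBit_alt]
  set w : Int := ((bList.headD "").toList.length : Int) with hw
  rw [pvInit w, pvBuild w bList (fun _ => 0)]
  have hlen : PySem.List.len ((PySem.List.pyRange 0 w 1).map (fun i => 0 + pvCol bList i)) = w := by
    rw [PySem.List.len, List.length_map, PySem.List.length_pyRange_one]
    simp [hw]
  rw [PySem.List.enumerate_eq_map_pyRange _ 0, hlen, List.foldl_map]
  apply PySem.List.foldl_congr_mem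
  intro acc i hi
  rcases (PySem.List.mem_pyRange_one).1 hi with ⟨h0, hww⟩
  rw [PySem.List.pyGetD_map_pyRange_of_nonneg _ w i 0 h0 hww]
  simp only [pvCountBit_eq, zero_add]
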